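-- pv_equiv track=rewrite | github.com/stat-thon/Coding-Test-Study-2nd | Dawny/Programmers/17TH/recruitdepart.py | solution
-- ===== SOURCE A (Python) =====
-- from collections import deque
--
-- def solution(scores):
--     rank = 1
--     wanho = scores[0]
--     s = sorted(scores, key = lambda x: (-x[0], x[1]))
--     q = deque(s)
--     q2 = deque([[0, 0]])
--
--     while q:
--         a = q.popleft()
--         if q2[-1][0] == a[0] or a[1] >= q2[-1][1]:
--             q2.append(a)
--     q2.popleft()
--
--     while q2:
--         rival = q2.popleft()
--         if wanho[0] < rival[0] and wanho[1] < rival[1]: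
--             return -1
--
--         if sum(wanho) < sum(rival):
--             rank += 1
--
--     return rank
-- ===== SOURCE B (Python) =====
-- def solution(scores):
--     wanho = scores[0]
--     w0, w1, ws = wanho[0], wanho[1], sum(wanho)
--     last_a, last_b = 0, 0
--     rank = 1
--     for x in sorted(scores, key=lambda t: (-t[0], t[1])):
--         a, b = x[0], x[1]
--         if last_a == a or b >= last_b:
--             if w0 < a and w1 < b:
--                 return -1
--             if ws < sum(x):
--                 rank += 1
--             last_a, last_b = a, b
--     return rank
-- ===== Notes on version B (the rewrite author's own statement) =====
-- stated objective: simpler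
-- what changed: Replaces the deque-built Pareto-front list plus a second scan with a single fused pass over the sorted list that keeps only the last kept pair (last_a,last_b) as scalar state, checking domination and counting the rank in the same pass.
import Mathlib
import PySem

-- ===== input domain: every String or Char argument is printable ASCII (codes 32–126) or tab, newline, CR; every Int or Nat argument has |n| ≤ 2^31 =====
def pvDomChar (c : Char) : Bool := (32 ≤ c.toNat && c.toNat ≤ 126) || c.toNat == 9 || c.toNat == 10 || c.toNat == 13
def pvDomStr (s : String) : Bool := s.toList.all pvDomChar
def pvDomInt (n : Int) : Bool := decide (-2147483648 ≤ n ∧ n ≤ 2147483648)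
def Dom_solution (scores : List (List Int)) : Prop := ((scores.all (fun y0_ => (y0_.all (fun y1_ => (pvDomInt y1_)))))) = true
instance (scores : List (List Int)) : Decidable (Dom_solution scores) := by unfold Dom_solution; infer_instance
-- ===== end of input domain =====

-- B fuses A's deque-built Pareto front and second scan into one pass with scalar state; return values proved equal on Pre_.

-- ===== PORT A =====
-- q2[-1] of the (always non-empty) deque; [] is never reached under Pre_
def pvLastA (q2 : List (List Int)) : List Int := q2.getLast?.getD []
-- first while loop: pop from q, append to q2 when the condition holds
def pvFrontA : List (List Int) → List (List Int) → List (List Int)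
  | [], q2 => q2
  | a :: q, q2 =>
      if (pvLastA q2).getD 0 0 == a.getD 0 0 || a.getD 1 0 ≥ (pvLastA q2).getD 1 0
      then pvFrontA q (q2 ++ [a])
      else pvFrontA q q2
-- second while loop: pop rivals, early return -1, count rank
def pvScanA (wanho : List Int) (rank : Int) : List (List Int) → Int
  | [] => rank
  | rival :: q2 =>
      if wanho.getD 0 0 < rival.getD 0 0 && wanho.getD 1 0 < rival.getD 1 0 then -1
      else pvScanA wanho (if wanho.sum < rival.sum then rank + 1 else rank) q2

def solution (scores : List (List Int)) : Int :=
  let wanho := scores.getD 0 []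
  let s := PySem.List.sorted2 scores (fun x => -(x.getD 0 0)) (fun x => x.getD 1 0) false
  -- q2 starts as deque([[0,0]]); after the loop, q2.popleft() drops the sentinel
  pvScanA wanho 1 ((pvFrontA s [[(0 : Int), 0]]).tail)

-- ===== PORT B =====
def pvLoopB (w0 w1 ws : Int) : List (List Int) → Int → Int → Int → Int
  | [], _, _, rank => rank
  | x :: rest, lastA, lastB, rank =>
      let a := x.getD 0 0
      let b := x.getD 1 0
      if lastA == a || b ≥ lastB then
        if w0 < a && w1 < b then -1
        else pvLoopB w0 w1 ws rest a b (if ws < x.sum then rank + 1 else rank)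
      else pvLoopB w0 w1 ws rest lastA lastB rank

def solution_alt (scores : List (List Int)) : Int :=
  let wanho := scores.getD 0 []
  pvLoopB (wanho.getD 0 0) (wanho.getD 1 0) wanho.sum
    (PySem.List.sorted2 scores (fun x => -(x.getD 0 0)) (fun x => x.getD 1 0) false) 0 0 1

-- ===== PRECONDITION & SPEC =====
-- Exactly where Python A returns: scores non-empty (scores[0]) and every row of length ≥ 2
-- (the sort key and the scans index x[0] and x[1] of every row).
def Pre_solution (scores : List (List Int)) : Prop :=
  scores ≠ [] ∧ ∀ x ∈ scores, 2 ≤ x.length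
instance (scores : List (List Int)) : Decidable (Pre_solution scores) := by
  unfold Pre_solution; infer_instance
def pvWitness_solution : List (List Int) := [[2, 2], [1, 4], [3, 1]]

def Spec_solution (scores : List (List Int)) (out : Int) : Prop := out = solution_alt scores
instance (scores : List (List Int)) (out : Int) : Decidable (Spec_solution scores out) := by unfold Spec_solution; infer_instance

-- ===== CLAIM (what is proved, stated in full; the proofs are below) =====
def Claim_equal_solution : Prop := ∀ (scores : List (List Int)), Dom_solution scores → Pre_solution scores → Spec_solution scores (solution scores)

-- ===== LEMMAS AND PROOFS =====

-- B's kept-elements stream, as a list: the elements A's first loop appends to q2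
-- when the last kept pair is (la, lb)
def pvKept : List (List Int) → Int → Int → List (List Int)
  | [], _, _ => []
  | x :: rest, la, lb =>
      if la == x.getD 0 0 || x.getD 1 0 ≥ lb then x :: pvKept rest (x.getD 0 0) (x.getD 1 0)
      else pvKept rest la lb

theorem pvFrontA_eq_kept (s : List (List Int)) :
    ∀ q2 : List (List Int), q2 ≠ [] →
      pvFrontA s q2 = q2 ++ pvKept s ((pvLastA q2).getD 0 0) ((pvLastA q2).getD 1 0) := by
  induction s with
  | nil => intro q2 _; simp [pvFrontA, pvKept]
  | cons a rest ih =>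
      intro q2 hq2
      simp only [pvFrontA, pvKept]
      by_cases h : ((pvLastA q2).getD 0 0 == a.getD 0 0 || a.getD 1 0 ≥ (pvLastA q2).getD 1 0) = true
      · have hlast : pvLastA (q2 ++ [a]) = a := by
          simp [pvLastA]
        rw [if_pos h, ih (q2 ++ [a]) (by simp), hlast, if_pos (by simpa [BEq.comm] using h)]
        simp
      · rw [if_neg h, ih q2 hq2, if_neg (by simpa [BEq.comm] using h)]

theorem pvScan_eq_loopB (w : List Int) (s : List (List Int)) :
    ∀ la lb rank,
      pvScanA w rank (pvKept s la lb) =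
        pvLoopB (w.getD 0 0) (w.getD 1 0) w.sum s la lb rank := by
  induction s with
  | nil => intro la lb rank; simp [pvKept, pvScanA, pvLoopB]
  | cons x rest ih =>
      intro la lb rank
      simp only [pvKept, pvLoopB]
      by_cases h : (la == x.getD 0 0 || x.getD 1 0 ≥ lb) = true
      · rw [if_pos h, if_pos h]
        simp only [pvScanA]
        by_cases hd : (w.getD 0 0 < x.getD 0 0 && w.getD 1 0 < x.getD 1 0) = true
        · rw [if_pos hd, if_pos hd]
        · rw [if_neg hd, if_neg hd, ih]
      · rw [if_neg h, if_neg h, ih]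

theorem solution_eq (scores : List (List Int)) : solution scores = solution_alt scores := by
  simp only [solution, solution_alt]
  rw [pvFrontA_eq_kept _ [[(0 : Int), 0]] (by simp)]
  have h1 : pvLastA [[(0 : Int), 0]] = [0, 0] := by simp [pvLastA]
  rw [h1]
  simp only [List.getD, List.getElem?_cons_zero, List.getElem?_cons_succ, Option.getD_some,
    List.singleton_append, List.tail_cons]
  rw [pvScan_eq_loopB]
  simp [List.getD]

-- ===== VERDICT (by name: the statement is the Claim_ definition above) =====
theorem solution_spec : Claim_equal_solution := by
  intro scores _ _
  unfold Spec_solution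
  exact solution_eq scores
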